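-- pv_equiv track=rewrite | github.com/vinchinzu/euler | python/388.py | brute_force_d
-- ===== SOURCE A (Python) =====
-- def gcd(a: int, b: int) -> int:
--     """Compute the greatest common divisor of two integers.
--
--     Uses Euclid's algorithm. Python's math.gcd could be used instead, but this
--     explicit version mirrors the original Ruby implementation and keeps the
--     function self-contained.
--     """
--
--     while b:
--         a, b = b, a % b
--     return a
--
-- def brute_force_d(n: int) -> int:
--     """Brute-force computation of D(n) for very small n.
--
--     Counts lattice points (a, b, c) with 0 <= a, b, c <= n for which gcd(a, b, c)
--     is 1, excluding the origin. This is O(n^3) and intended only for tests.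
--     """
--
--     count = 0
--     for a in range(n + 1):
--         for b in range(n + 1):
--             for c in range(n + 1):
--                 if a == 0 and b == 0 and c == 0:
--                     continue
--                 if gcd(gcd(a, b), c) == 1:
--                     count += 1
--     return count
-- ===== SOURCE B (Python) =====
-- def gcd(a, b):
--     while b:
--         a, b = b, a % b
--     return a
--
-- def brute_force_d(n: int) -> int:
--     # Precompute, for each g in 0..n, how many c in 0..n have gcd(g, c) == 1;
--     # then sum the table entry at gcd(a, b) over all pairs (a, b).
--     cnt = [sum(1 for c in range(n + 1) if gcd(g, c) == 1) for g in range(n + 1)]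
--     total = 0
--     for a in range(n + 1):
--         for b in range(n + 1):
--             total += cnt[gcd(a, b)]
--     return total
-- ===== Notes on version B (the rewrite author's own statement) =====
-- stated objective: faster
-- what changed: Replaces the innermost scan over c by a precomputed table indexed by g = gcd(a, b) (for each possible g, the count of c values coprime to g is computed once), turning the triple loop into a double loop plus a quadratic table build.
import Mathlib
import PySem

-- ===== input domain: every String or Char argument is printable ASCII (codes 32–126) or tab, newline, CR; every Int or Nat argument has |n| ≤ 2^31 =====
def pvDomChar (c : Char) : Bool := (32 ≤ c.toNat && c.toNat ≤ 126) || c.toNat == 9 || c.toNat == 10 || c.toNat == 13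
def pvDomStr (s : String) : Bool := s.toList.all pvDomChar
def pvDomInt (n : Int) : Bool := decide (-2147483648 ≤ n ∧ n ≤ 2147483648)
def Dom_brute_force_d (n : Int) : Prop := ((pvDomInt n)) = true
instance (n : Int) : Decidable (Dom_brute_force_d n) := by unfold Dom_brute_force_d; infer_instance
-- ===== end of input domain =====

-- B replaces the innermost loop over c by a precomputed table indexed by gcd(a, b): faster.

-- shared helper: Python's hand-written gcd (while b: a, b = b, a % b)
theorem pyModAbsLt (a b : Int) (hb : ¬ b = 0) :
    (PySem.Int.mod a b).natAbs < b.natAbs := by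
  rcases lt_or_gt_of_ne hb with h | h
  · have h2 := PySem.Int.mod_neg_bounds a h
    omega
  · have h1 := PySem.Int.mod_nonneg a h
    have h2 := PySem.Int.mod_lt a h
    omega

def pyGcd (a b : Int) : Int :=
  if h : b = 0 then a
  else pyGcd b (PySem.Int.mod a b)
termination_by b.natAbs
decreasing_by exact pyModAbsLt a b h

-- ===== PORT A =====
def brute_force_d (n : Int) : Int :=
  (PySem.List.pyRange 0 (n+1) 1).foldl (fun count a =>
    (PySem.List.pyRange 0 (n+1) 1).foldl (fun count b =>
      (PySem.List.pyRange 0 (n+1) 1).foldl (fun count c =>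
        if a = 0 ∧ b = 0 ∧ c = 0 then count
        else if pyGcd (pyGcd a b) c = 1 then count + 1 else count) count) count) 0

-- ===== PORT B =====
-- sum(1 for c in range(n + 1) if gcd(g, c) == 1)
def cntEntry (n g : Int) : Int :=
  (PySem.List.pyRange 0 (n+1) 1).foldl (fun s c => if pyGcd g c = 1 then s + 1 else s) 0

def brute_force_d_alt (n : Int) : Int :=
  let cnt := (PySem.List.pyRange 0 (n+1) 1).map (fun g => cntEntry n g)
  -- cnt[gcd(a, b)]: the index is always in range (0 ≤ gcd(a, b) ≤ n), so getD's default is never used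
  (PySem.List.pyRange 0 (n+1) 1).foldl (fun total a =>
    (PySem.List.pyRange 0 (n+1) 1).foldl (fun total b =>
      total + PySem.List.pyGetD cnt (pyGcd a b) 0) total) 0

-- ===== PRECONDITION & SPEC =====
def Spec_brute_force_d (n : Int) (out : Int) : Prop := out = brute_force_d_alt n
instance (n : Int) (out : Int) : Decidable (Spec_brute_force_d n out) := by unfold Spec_brute_force_d; infer_instance

-- ===== CLAIM (what is proved, stated in full; the proofs are below) =====
def Claim_equal_brute_force_d : Prop := ∀ (n : Int), Dom_brute_force_d n → Spec_brute_force_d n (brute_force_d n)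

-- ===== LEMMAS AND PROOFS =====

theorem pyGcd_zero (a : Int) : pyGcd a 0 = a := by
  rw [pyGcd]; simp

theorem pyGcd_of_ne (a b : Int) (h : b ≠ 0) :
    pyGcd a b = pyGcd b (PySem.Int.mod a b) := by
  rw [pyGcd]; simp [h]

theorem pyGcd_nonneg_le (n : Int) : ∀ (k : Nat) (a b : Int), b.natAbs ≤ k →
    0 ≤ a → a ≤ n → 0 ≤ b → b ≤ n → 0 ≤ pyGcd a b ∧ pyGcd a b ≤ n := by
  intro k
  induction k with
  | zero =>
    intro a b hk ha han hb hbn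
    have : b = 0 := by omega
    subst this
    rw [pyGcd_zero]; exact ⟨ha, han⟩
  | succ k ih =>
    intro a b hk ha han hb hbn
    by_cases h : b = 0
    · subst h; rw [pyGcd_zero]; exact ⟨ha, han⟩
    · have hbpos : 0 < b := by omega
      have h1 := PySem.Int.mod_nonneg a hbpos
      have h2 := PySem.Int.mod_lt a hbpos
      rw [pyGcd_of_ne a b h]
      exact ih b (PySem.Int.mod a b) (by omega) hb hbn h1 (by omega)

theorem foldl_count_shift (l : List Int) (p : Int → Bool) (init : Int) :
    l.foldl (fun s c => if p c then s + 1 else s) init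
      = init + l.foldl (fun s c => if p c then s + 1 else s) 0 := by
  induction l generalizing init with
  | nil => simp
  | cons c l' ih =>
    simp only [List.foldl_cons]
    rw [ih (if p c then init + 1 else init), ih (if p c then 0 + 1 else 0)]
    split_ifs <;> ring

theorem inner_fold_eq (n a b count : Int) :
    (PySem.List.pyRange 0 (n+1) 1).foldl (fun count c =>
        if a = 0 ∧ b = 0 ∧ c = 0 then count
        else if pyGcd (pyGcd a b) c = 1 then count + 1 else count) count
      = count + cntEntry n (pyGcd a b) := by
  have hcongr : (PySem.List.pyRange 0 (n+1) 1).foldl (fun count c =>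
        if a = 0 ∧ b = 0 ∧ c = 0 then count
        else if pyGcd (pyGcd a b) c = 1 then count + 1 else count) count
      = (PySem.List.pyRange 0 (n+1) 1).foldl (fun s c =>
        if (fun c => decide (pyGcd (pyGcd a b) c = 1)) c then s + 1 else s) count := by
    apply PySem.List.foldl_congr_mem
    intro acc c _
    by_cases hz : a = 0 ∧ b = 0 ∧ c = 0
    · obtain ⟨ha, hb, hc⟩ := hz
      subst ha; subst hb; subst hc
      simp [pyGcd_zero]
    · simp only [if_neg hz]
      by_cases hg : pyGcd (pyGcd a b) c = 1 <;> simp [hg]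
  rw [hcongr, foldl_count_shift]
  congr 1
  unfold cntEntry
  apply PySem.List.foldl_congr_mem
  intro acc c _
  by_cases hg : pyGcd (pyGcd a b) c = 1 <;> simp [hg]

-- ===== VERDICT (by name: the statement is the Claim_ definition above) =====
theorem brute_force_d_spec : Claim_equal_brute_force_d := by
  intro n _
  unfold Spec_brute_force_d brute_force_d brute_force_d_alt
  apply PySem.List.foldl_congr_mem
  intro acc a hamem
  apply PySem.List.foldl_congr_mem
  intro acc' b hbmem
  rw [PySem.List.mem_pyRange_one] at hamem hbmem
  have hg := pyGcd_nonneg_le n b.natAbs a b (le_refl _)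
    hamem.1 (by omega) hbmem.1 (by omega)
  rw [inner_fold_eq]
  congr 1
  rw [PySem.List.pyGetD_map_pyRange_of_nonneg (fun g => cntEntry n g) (n+1)
    (pyGcd a b) 0 hg.1 (by omega)]
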